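-- pv_equiv track=rewrite | github.com/Bellsoo/pythonGR | chef-oui-chef.py | check_salute
-- ===== SOURCE A (Python) =====
-- def check_salute(corridor):
--     if not isinstance(corridor, str):
--         return 0
--
--     salute = 0
--     officer_to_right = []
--     officer_to_left = []
--
--     for i, direction in enumerate(corridor):
--         if direction not in ['-', '>', '<']:
--             return 0
--         if direction == '>' and '<':
--             officer_to_right.append(i)
--         elif direction == '<' and '>':
--             officer_to_left.append(i)
--             salute += len(officer_to_right)
--
--     return salute
-- ===== SOURCE B (Python) =====
-- def check_salute(corridor):
--     if not isinstance(corridor, str):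
--         return 0
--
--     # Divide and conquer: a segment yields (valid, rights, lefts, salutes);
--     # merging two halves adds rights(left half) * lefts(right half) cross pairs.
--     def solve(lo, hi):
--         if hi - lo == 0:
--             return (True, 0, 0, 0)
--         if hi - lo == 1:
--             c = corridor[lo]
--             if c == '>':
--                 return (True, 1, 0, 0)
--             if c == '<':
--                 return (True, 0, 1, 0)
--             if c == '-':
--                 return (True, 0, 0, 0)
--             return (False, 0, 0, 0)
--         mid = (lo + hi) // 2
--         v1, r1, l1, s1 = solve(lo, mid)
--         v2, r2, l2, s2 = solve(mid, hi)
--         return (v1 and v2, r1 + r2, l1 + l2, s1 + s2 + r1 * l2)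
--
--     v, r, l, s = solve(0, len(corridor))
--     return s if v else 0
-- ===== Notes on version B (the rewrite author's own statement) =====
-- stated objective: alternative
-- what changed: B replaces A's single left-to-right scan with index lists by a divide-and-conquer recursion: each half returns (valid, #right-facers, #left-facers, salutes) and merging adds the cross product rights(left half) * lefts(right half).
import Mathlib
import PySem

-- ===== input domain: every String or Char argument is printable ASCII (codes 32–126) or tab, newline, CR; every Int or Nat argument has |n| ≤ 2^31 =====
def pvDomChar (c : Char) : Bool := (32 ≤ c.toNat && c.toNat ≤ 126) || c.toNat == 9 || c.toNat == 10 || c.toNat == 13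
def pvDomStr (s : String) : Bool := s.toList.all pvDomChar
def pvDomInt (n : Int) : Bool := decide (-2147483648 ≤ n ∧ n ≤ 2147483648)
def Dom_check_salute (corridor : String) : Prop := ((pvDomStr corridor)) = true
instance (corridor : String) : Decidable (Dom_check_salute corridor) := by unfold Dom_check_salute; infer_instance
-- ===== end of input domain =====

-- B replaces A's single fused scan by a divide-and-conquer recursion on halves
-- (alternative decomposition, same asymptotic cost).

-- ===== PORT A =====
-- loop of A: early-return 0 on an invalid character, else maintain salute and the two index lists
def checkSaluteGoA : List (Int × Char) → Int → List Int → List Int → Int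
  | [], salute, _, _ => salute
  | (i, c) :: rest, salute, r, l =>
    if ¬ (c = '-' ∨ c = '>' ∨ c = '<') then 0
    else if c = '>' then checkSaluteGoA rest salute (r ++ [i]) l
    else if c = '<' then checkSaluteGoA rest (salute + (r.length : Int)) r (l ++ [i])
    else checkSaluteGoA rest salute r l

def check_salute (corridor : String) : Int :=
  checkSaluteGoA (PySem.List.enumerate corridor.toList) 0 [] []

-- ===== PORT B =====
-- solve(lo,hi) of B, on the segment as a list: (valid, rights, lefts, salutes)
def checkSaluteSolveB : List Char → Bool × Int × Int × Int
  | [] => (true, 0, 0, 0)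
  | [c] =>
    if c = '>' then (true, 1, 0, 0)
    else if c = '<' then (true, 0, 1, 0)
    else if c = '-' then (true, 0, 0, 0)
    else (false, 0, 0, 0)
  | c₁ :: c₂ :: cs =>
    let whole := c₁ :: c₂ :: cs
    let mid := whole.length / 2
    let (v1, r1, l1, s1) := checkSaluteSolveB (whole.take mid)
    let (v2, r2, l2, s2) := checkSaluteSolveB (whole.drop mid)
    (v1 && v2, r1 + r2, l1 + l2, s1 + s2 + r1 * l2)
termination_by cs => cs.length
decreasing_by
  · simp [List.length_take]; omega
  · simp [List.length_drop]; omega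

def check_salute_alt (corridor : String) : Int :=
  let (v, _, _, s) := checkSaluteSolveB corridor.toList
  if v then s else 0

-- ===== PRECONDITION & SPEC =====
def Spec_check_salute (corridor : String) (out : Int) : Prop := out = check_salute_alt corridor
instance (corridor : String) (out : Int) : Decidable (Spec_check_salute corridor out) := by unfold Spec_check_salute; infer_instance

-- ===== CLAIM (what is proved, stated in full; the proofs are below) =====
def Claim_equal_check_salute : Prop := ∀ (corridor : String), Dom_check_salute corridor → Spec_check_salute corridor (check_salute corridor)

-- ===== LEMMAS AND PROOFS =====

-- specification helpers: validity, counts of '>' and '<', and ordered '>'-before-'<' pairs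
def csVld : List Char → Bool
  | [] => true
  | c :: cs => (c = '-' || c = '>' || c = '<') && csVld cs

def csR : List Char → Int
  | [] => 0
  | c :: cs => (if c = '>' then 1 else 0) + csR cs

def csL : List Char → Int
  | [] => 0
  | c :: cs => (if c = '<' then 1 else 0) + csL cs

def csP : List Char → Int
  | [] => 0
  | c :: cs => (if c = '>' then csL cs else 0) + csP cs

theorem csVld_all (cs : List Char) :
    csVld cs = cs.all (fun c => c = '-' || c = '>' || c = '<') := by
  induction cs with
  | nil => rfl
  | cons c cs ih => simp [csVld, ih]

theorem csR_append (xs ys : List Char) : csR (xs ++ ys) = csR xs + csR ys := by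
  induction xs with
  | nil => simp [csR]
  | cons x xs ih => simp [csR, ih]; ring

theorem csL_append (xs ys : List Char) : csL (xs ++ ys) = csL xs + csL ys := by
  induction xs with
  | nil => simp [csL]
  | cons x xs ih => simp [csL, ih]; ring

theorem csVld_append (xs ys : List Char) : csVld (xs ++ ys) = (csVld xs && csVld ys) := by
  induction xs with
  | nil => simp [csVld]
  | cons x xs ih => simp [csVld, ih, Bool.and_assoc]

theorem csP_append (xs ys : List Char) :
    csP (xs ++ ys) = csP xs + csP ys + csR xs * csL ys := by
  induction xs with
  | nil => simp [csP, csR]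
  | cons x xs ih =>
    simp only [List.cons_append, csP, csR, ih, csL_append]
    split_ifs <;> ring

-- A's running loop, abstracted from the index lists (salute accumulator + running '>' count)
def checkSaluteRef : List Char → Int → Int → Int
  | [], salute, _ => salute
  | c :: cs, salute, run =>
    if c = '>' then checkSaluteRef cs salute (run + 1)
    else if c = '<' then checkSaluteRef cs (salute + run) run
    else checkSaluteRef cs salute run

theorem goA_invalid (cs : List Char) (n : Int) (s : Int) (r l : List Int)
    (h : ¬ cs.all (fun c => c = '-' || c = '>' || c = '<')) :
    checkSaluteGoA (PySem.List.enumerate cs n) s r l = 0 := by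
  induction cs generalizing n s r l with
  | nil => simp at h
  | cons c cs ih =>
    rw [PySem.List.enumerate_cons]
    by_cases hv : c = '-' ∨ c = '>' ∨ c = '<'
    · have h' : ¬ cs.all (fun c => c = '-' || c = '>' || c = '<') := by
        simp only [List.all_cons] at h
        intro hc; apply h; simp [hc]; tauto
      rcases hv with hv | hv | hv <;> subst hv <;>
        simp [checkSaluteGoA, ih _ _ _ _ h']
    · simp [checkSaluteGoA, hv]

theorem goA_valid (cs : List Char) (n : Int) (s : Int) (r l : List Int)
    (h : cs.all (fun c => c = '-' || c = '>' || c = '<')) :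
    checkSaluteGoA (PySem.List.enumerate cs n) s r l = checkSaluteRef cs s (r.length : Int) := by
  induction cs generalizing n s r l with
  | nil => simp [PySem.List.enumerate, checkSaluteGoA, checkSaluteRef]
  | cons c cs ih =>
    rw [PySem.List.enumerate_cons]
    simp only [List.all_cons, Bool.and_eq_true] at h
    obtain ⟨hc, hrest⟩ := h
    have hv : c = '-' ∨ c = '>' ∨ c = '<' := by
      simp at hc; tauto
    rcases hv with hv | hv | hv <;> subst hv <;>
      simp [checkSaluteGoA, checkSaluteRef, ih _ _ _ _ hrest]

theorem ref_closed (cs : List Char) (s run : Int) :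
    checkSaluteRef cs s run = s + run * csL cs + csP cs := by
  induction cs generalizing s run with
  | nil => simp [checkSaluteRef, csL, csP]
  | cons c cs ih =>
    simp only [checkSaluteRef, csL, csP]
    split_ifs with h1 h2 <;> simp_all <;> ring

theorem solveB_closed_aux (n : Nat) : ∀ cs : List Char, cs.length ≤ n →
    checkSaluteSolveB cs = (csVld cs, csR cs, csL cs, csP cs) := by
  induction n with
  | zero =>
    intro cs h
    have : cs = [] := by cases cs with | nil => rfl | cons a as => simp at h
    subst this
    simp [checkSaluteSolveB, csVld, csR, csL, csP]
  | succ n ih =>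
    intro cs h
    match cs with
    | [] => simp [checkSaluteSolveB, csVld, csR, csL, csP]
    | [c] =>
      rw [checkSaluteSolveB]
      split_ifs with h1 h2 h3 <;> simp_all [csVld, csR, csL, csP]
    | c₁ :: c₂ :: rest =>
      rw [checkSaluteSolveB]
      simp only [List.length_cons] at h ⊢
      have h1 : (List.take ((rest.length + 1 + 1) / 2) (c₁ :: c₂ :: rest)).length ≤ n := by
        simp only [List.length_take, List.length_cons]; omega
      have h2 : (List.drop ((rest.length + 1 + 1) / 2) (c₁ :: c₂ :: rest)).length ≤ n := by
        simp only [List.length_drop, List.length_cons]; omega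
      rw [ih _ h1, ih _ h2]
      have hsplit : c₁ :: c₂ :: rest =
          List.take ((rest.length + 1 + 1) / 2) (c₁ :: c₂ :: rest) ++
          List.drop ((rest.length + 1 + 1) / 2) (c₁ :: c₂ :: rest) := by simp
      conv_rhs => rw [hsplit, csVld_append, csR_append, csL_append, csP_append]

-- B's divide-and-conquer computes exactly (validity, counts, ordered pairs)
theorem solveB_closed (cs : List Char) :
    checkSaluteSolveB cs = (csVld cs, csR cs, csL cs, csP cs) :=
  solveB_closed_aux cs.length cs le_rfl

-- ===== VERDICT (by name: the statement is the Claim_ definition above) =====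
theorem check_salute_spec : Claim_equal_check_salute := by
  intro corridor _
  unfold Spec_check_salute check_salute check_salute_alt
  rw [solveB_closed]
  by_cases h : corridor.toList.all (fun c => c = '-' || c = '>' || c = '<')
  · rw [goA_valid _ _ _ _ _ h, ref_closed]
    simp [csVld_all, h]
  · rw [goA_invalid _ _ _ _ _ h]
    simp [csVld_all, h]
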